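-- pv_equiv track=rewrite | github.com/thantrieu/Python2030 | net/braniumacademy/ex_chapter3/lesson31/Exercises4.py | is_reverse_prime
-- ===== SOURCE A (Python) =====
-- import math
--
-- def is_prime(n):
--     """This function check whether or not n is prime number"""
--     if n < 2:
--         return False
--     else:
--         bound = int(math.sqrt(n))
--         for x in range(2, bound + 1):
--             if n % x == 0:
--                 return False
--         return True
--
-- def is_reverse_prime(n):
--     """This function check whether or not reverse number of n is prime number"""
--     if n < 2:
--         return False
--     else:
--         r = 0
--         while n > 0:
--             r = r * 10 + n % 10
--             n //= 10
--         return is_prime(r)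
-- ===== SOURCE B (Python) =====
-- import math
--
-- def is_prime(m):
--     """Trial division by PRIMES only: build, with a running prime list, every
--     prime up to isqrt(m), then test m against that list."""
--     if m < 2:
--         return False
--     primes = []
--     for x in range(2, math.isqrt(m) + 1):
--         x_is_prime = True
--         for p in primes:
--             if p * p > x:
--                 break
--             if x % p == 0:
--                 x_is_prime = False
--                 break
--         if x_is_prime:
--             primes.append(x)
--     return all(m % p != 0 for p in primes)
--
-- def is_reverse_prime(n):
--     if n < 2:
--         return False
--     # digit i of str(n) carries weight 10**i in the reversed number
--     r = sum((ord(c) - 48) * 10 ** i for i, c in enumerate(str(n)))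
--     return is_prime(r)
-- ===== Notes on version B (the rewrite author's own statement) =====
-- stated objective: alternative
-- what changed: B computes the reversed number as a positional weighted sum over enumerate(str(n)) (digit i gets weight 10**i) instead of A's arithmetic peel-off accumulator loop, and replaces A's single trial-division scan over range(2,int(sqrt(n))+1) by a two-stage test that first builds the list of all primes up to isqrt(m) (each candidate checked only against the already-found primes up to its own square root) and then divides m by those primes only.
import Mathlib
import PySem

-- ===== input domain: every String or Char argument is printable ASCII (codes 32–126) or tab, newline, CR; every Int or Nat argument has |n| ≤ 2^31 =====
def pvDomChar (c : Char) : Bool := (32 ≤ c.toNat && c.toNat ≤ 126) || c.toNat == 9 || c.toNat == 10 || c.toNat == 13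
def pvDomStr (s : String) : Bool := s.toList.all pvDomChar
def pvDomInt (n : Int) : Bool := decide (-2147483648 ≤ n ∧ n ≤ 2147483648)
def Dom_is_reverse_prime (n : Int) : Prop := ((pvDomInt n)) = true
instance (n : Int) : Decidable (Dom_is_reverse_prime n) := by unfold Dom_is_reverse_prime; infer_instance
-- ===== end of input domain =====

-- B computes the reversal as a positional weighted sum over enumerate(str(n)) instead of A's
-- peel-off accumulator loop, and tests primality by first building the list of primes up to
-- isqrt(m) and trial-dividing by those primes only; alternative structure, not faster.

-- ===== PORT A =====
-- for x in range(2, bound + 1): if n % x == 0: return False / return True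
def aPrimeLoop (n : Int) : List Int → Bool
  | [] => true
  | x :: xs => if PySem.Int.mod n x = 0 then false else aPrimeLoop n xs

def is_prime_A (n : Int) : Bool :=
  if n < 2 then false
  else
    -- int(math.sqrt(n)): ported as the integer square root, exact for every value this
    -- program feeds it (|n| ≤ 2^31 and its digit reversals, all < 2^34)
    let bound : Int := (Nat.sqrt n.toNat : Int)
    aPrimeLoop n (PySem.List.pyRange 2 (bound + 1) 1)

-- while n > 0: r = r * 10 + n % 10; n //= 10
def aRevLoop (n r : Int) : Int :=
  if 0 < n then aRevLoop (PySem.Int.floordiv n 10) (r * 10 + PySem.Int.mod n 10) else r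
termination_by n.toNat
decreasing_by
  rw [PySem.Int.floordiv_eq_ediv_of_pos (by norm_num)]
  omega

def is_reverse_prime (n : Int) : Bool :=
  if n < 2 then false else is_prime_A (aRevLoop n 0)

-- ===== PORT B =====
-- inner loop: for p in primes: if p*p > x: break; if x % p == 0: not prime; break
def bInner (x : Int) : List Int → Bool
  | [] => true
  | p :: ps =>
    if x < p * p then true
    else if PySem.Int.mod x p = 0 then false
    else bInner x ps

-- for x in range(2, isqrt(m)+1): … if x_is_prime: primes.append(x)
def bBuild (ps : List Int) (x : Int) : List Int :=
  if bInner x ps then ps ++ [x] else ps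

def is_prime_B (m : Int) : Bool :=
  if m < 2 then false
  else
    -- math.isqrt(m) is exactly the integer square root
    let bound : Int := (Nat.sqrt m.toNat : Int)
    let primes := List.foldl bBuild [] (PySem.List.pyRange 2 (bound + 1) 1)
    primes.all (fun p => PySem.Int.mod m p != 0)

def is_reverse_prime_alt (n : Int) : Bool :=
  if n < 2 then false
  else
    -- sum((ord(c) - 48) * 10 ** i for i, c in enumerate(str(n))); the enumerate index i
    -- is nonnegative, so 10 ** i is ported as 10 ^ i.toNat
    is_prime_B (((PySem.List.enumerate (PySem.Int.toChars n) 0).map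
      (fun ic => ((ic.2.toNat : Int) - 48) * 10 ^ ic.1.toNat)).sum)

-- ===== PRECONDITION & SPEC =====
def Spec_is_reverse_prime (n : Int) (out : Bool) : Prop := out = is_reverse_prime_alt n
instance (n : Int) (out : Bool) : Decidable (Spec_is_reverse_prime n out) := by unfold Spec_is_reverse_prime; infer_instance

-- ===== CLAIM (what is proved, stated in full; the proofs are below) =====
def Claim_equal_is_reverse_prime : Prop := ∀ (n : Int), Dom_is_reverse_prime n → Spec_is_reverse_prime n (is_reverse_prime n)

-- ===== LEMMAS AND PROOFS =====

-- ---- the two digit reversals agree ----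

theorem digitChar_toNat (d : Nat) (hd : d < 10) : (Nat.digitChar d).toNat = d + 48 := by
  interval_cases d <;> rfl

-- core's big-endian character digits versus Mathlib's little-endian digits
theorem toDigitsCore_eq (f : Nat) : ∀ (n : Nat) (acc : List Char), 0 < n → n < f →
    Nat.toDigitsCore 10 f n acc = ((Nat.digits 10 n).map Nat.digitChar).reverse ++ acc := by
  induction f with
  | zero => intro n acc h hf; omega
  | succ f ih =>
    intro n acc hn hf
    rw [Nat.toDigitsCore]
    by_cases h : n / 10 = 0
    · rw [if_pos h, Nat.digits_def' (by norm_num) hn, h, Nat.digits_zero]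
      simp
    · rw [if_neg h, ih (n / 10) _ (by omega) (by omega),
        Nat.digits_def' (by norm_num : (1:Nat) < 10) hn]
      simp

theorem toDigits_eq (n : Nat) (h : 0 < n) :
    Nat.toDigits 10 n = ((Nat.digits 10 n).map Nat.digitChar).reverse := by
  have := toDigitsCore_eq (n + 1) n [] h (Nat.lt_succ_self n)
  simpa [Nat.toDigits] using this

-- A's reversal loop folds the little-endian digit list
theorem aRevLoop_eq (m : Nat) : ∀ (r : Int),
    aRevLoop (m : Int) r
      = List.foldl (fun (r : Int) (d : Nat) => r * 10 + (d : Int)) r (Nat.digits 10 m) := by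
  induction m using Nat.strong_induction_on with
  | _ m ih =>
    intro r
    rw [aRevLoop]
    by_cases hm : 0 < m
    · rw [if_pos (by exact_mod_cast hm), show (10:Int) = ((10:Nat):Int) from rfl,
        PySem.Int.floordiv_natCast, PySem.Int.mod_natCast,
        ih (m / 10) (by omega), Nat.digits_def' (by norm_num : (1:Nat) < 10) hm]
      simp
    · have hm0 : m = 0 := by omega
      subst hm0
      rw [if_neg (by norm_num)]
      simp

-- the Horner fold over big-endian characters, read from an accumulator
def revHorner (cs : List Char) : Int :=
  List.foldl (fun r c => r * 10 + ((c.toNat : Int) - 48)) 0 cs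

-- B's weighted sum over enumerate equals the Horner fold of the reversed characters
theorem sum_enumerate_eq (cs : List Char) : ∀ (s : Int), 0 ≤ s →
    ((PySem.List.enumerate cs s).map
      (fun ic => ((ic.2.toNat : Int) - 48) * 10 ^ ic.1.toNat)).sum
      = 10 ^ s.toNat * revHorner cs.reverse := by
  induction cs with
  | nil => intro s hs; simp [PySem.List.enumerate_nil, revHorner]
  | cons c cs ih =>
    intro s hs
    rw [PySem.List.enumerate_cons, List.map_cons, List.sum_cons, ih (s + 1) (by omega)]
    have hsucc : (s + 1).toNat = s.toNat + 1 := by omega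
    rw [hsucc, List.reverse_cons]
    unfold revHorner
    rw [List.foldl_append]
    simp only [List.foldl_cons, List.foldl_nil]
    ring

-- B's reversal value equals A's reversal loop (for 0 < n)
theorem rev_eq (n : Int) (hn : 0 < n) :
    ((PySem.List.enumerate (PySem.Int.toChars n) 0).map
      (fun ic => ((ic.2.toNat : Int) - 48) * 10 ^ ic.1.toNat)).sum = aRevLoop n 0 := by
  have h1 : PySem.Int.toChars n = Nat.toDigits 10 n.toNat := by
    rw [PySem.Int.toChars, if_neg (by omega)]
  rw [sum_enumerate_eq _ 0 le_rfl, h1, toDigits_eq n.toNat (by omega)]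
  unfold revHorner
  rw [List.reverse_reverse, List.foldl_map,
    show n = ((n.toNat : Nat) : Int) from (Int.toNat_of_nonneg (by omega)).symm, aRevLoop_eq,
    Int.toNat_natCast]
  norm_num
  apply List.foldl_ext
  intro a d hd
  rw [digitChar_toNat d (Nat.digits_lt_base (by norm_num) hd)]
  push_cast
  ring

-- ---- the two primality tests agree: each is 'm ≥ 2 and m.toNat is prime' ----

-- a number ≥ 2 is prime iff no k with 2 ≤ k and k*k ≤ m divides it
theorem prime_iff_no_small_dvd (m : Nat) (h2 : 2 ≤ m) :
    m.Prime ↔ ∀ k, 2 ≤ k → k * k ≤ m → ¬ k ∣ m := by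
  constructor
  · intro hp k hk hkk hdvd
    rcases (Nat.Prime.eq_one_or_self_of_dvd hp k hdvd) with h | h <;> nlinarith
  · intro h
    by_contra hnp
    have hq : (Nat.minFac m).Prime := Nat.minFac_prime (by omega)
    have hsq : Nat.minFac m ^ 2 ≤ m := Nat.minFac_sq_le_self (by omega) hnp
    exact h (Nat.minFac m) hq.two_le (by nlinarith) (Nat.minFac_dvd m)

-- a number ≥ 2 is prime iff no PRIME q with q*q ≤ m divides it
theorem prime_iff_no_small_prime_dvd (m : Nat) (h2 : 2 ≤ m) :
    m.Prime ↔ ∀ q, q.Prime → q * q ≤ m → ¬ q ∣ m := by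
  rw [prime_iff_no_small_dvd m h2]
  constructor
  · intro h q hq hqq hdvd
    exact h q hq.two_le hqq hdvd
  · intro h k hk hkk hdvd
    have hq : (Nat.minFac k).Prime := Nat.minFac_prime (by omega)
    have hle : Nat.minFac k ≤ k := Nat.minFac_le (by omega)
    exact h (Nat.minFac k) hq (by nlinarith) ((Nat.minFac_dvd k).trans hdvd)

-- A's scan is exactly that characterisation
theorem aPrimeLoop_true_iff (n : Int) (xs : List Int) :
    aPrimeLoop n xs = true ↔ ∀ x ∈ xs, PySem.Int.mod n x ≠ 0 := by
  induction xs with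
  | nil => simp [aPrimeLoop]
  | cons x xs ih =>
    by_cases h : PySem.Int.mod n x = 0 <;> simp [aPrimeLoop, h, ih]

theorem aPrime_true_iff (r : Int) (hr : 2 ≤ r) :
    is_prime_A r = true ↔ ∀ m : Nat, 2 ≤ m → m * m ≤ r.toNat → ¬ m ∣ r.toNat := by
  rw [is_prime_A, if_neg (by omega)]
  simp only [aPrimeLoop_true_iff]
  constructor
  · intro h m h2 hmm hdvd
    have hx : (m : Int) ∈ PySem.List.pyRange 2 ((Nat.sqrt r.toNat : Int) + 1) := by
      rw [PySem.List.mem_pyRange_one]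
      have : m ≤ Nat.sqrt r.toNat := Nat.le_sqrt.mpr hmm
      omega
    exact h _ hx ((PySem.Int.mod_eq_zero_iff_dvd _ _).mpr (by
      have : ((m : Int)) ∣ ((r.toNat : Int)) := Int.natCast_dvd_natCast.mpr hdvd
      rwa [Int.toNat_of_nonneg (by omega)] at this))
  · intro h x hx hmod
    rw [PySem.List.mem_pyRange_one] at hx
    have hdvd : x ∣ r := (PySem.Int.mod_eq_zero_iff_dvd _ _).mp hmod
    refine h x.toNat (by omega) ?_ ?_
    · have : x.toNat ≤ Nat.sqrt r.toNat := by omega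
      exact Nat.le_sqrt.mp this
    · have : ((x.toNat : Int)) ∣ ((r.toNat : Int)) := by
        rwa [Int.toNat_of_nonneg (by omega), Int.toNat_of_nonneg (by omega)]
      exact_mod_cast this

theorem aPrime_eq_prime (r : Int) (hr : 2 ≤ r) :
    is_prime_A r = decide (Nat.Prime r.toNat) := by
  rw [Bool.eq_iff_iff, aPrime_true_iff r hr, decide_eq_true_iff,
    prime_iff_no_small_dvd r.toNat (by omega)]

-- ---- B's prime-list builder ----

-- the primes in [2, b], as Ints in increasing order
def natPrimes (b : Int) : List Int :=
  (PySem.List.pyRange 2 (b + 1) 1).filter (fun p => decide (Nat.Prime p.toNat))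

theorem mem_natPrimes (b : Int) (p : Int) :
    p ∈ natPrimes b ↔ 2 ≤ p ∧ p ≤ b ∧ Nat.Prime p.toNat := by
  unfold natPrimes
  rw [List.mem_filter, PySem.List.mem_pyRange_one]
  simp only [decide_eq_true_eq]
  constructor
  · rintro ⟨⟨h1, h2⟩, h3⟩
    exact ⟨h1, by omega, h3⟩
  · rintro ⟨h1, h2, h3⟩
    exact ⟨⟨h1, by omega⟩, h3⟩

theorem natPrimes_sorted (b : Int) : (natPrimes b).Pairwise (· ≤ ·) := by
  exact ((PySem.List.pairwise_lt_pyRange_one 2 (b + 1)).filter _).imp (fun h => le_of_lt h)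

theorem natPrimes_nonneg (b : Int) (p : Int) (hp : p ∈ natPrimes b) : 0 ≤ p := by
  have := (mem_natPrimes b p).mp hp
  omega

-- the break-loop on a sorted nonnegative list checks every prime p with p*p ≤ x
theorem bInner_iff (x : Int) (ps : List Int) (hsort : ps.Pairwise (· ≤ ·))
    (hpos : ∀ p ∈ ps, 0 ≤ p) :
    bInner x ps = true ↔ ∀ p ∈ ps, p * p ≤ x → PySem.Int.mod x p ≠ 0 := by
  induction ps with
  | nil => simp [bInner]
  | cons p ps ih =>
    rw [List.pairwise_cons] at hsort
    by_cases hbr : x < p * p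
    · rw [bInner, if_pos hbr]
      simp only [true_iff, List.mem_cons]
      rintro q (rfl | hq) hqq
      · omega
      · have h1 : p ≤ q := hsort.1 q hq
        have h0 : 0 ≤ p := hpos p List.mem_cons_self
        nlinarith
    · rw [bInner, if_neg hbr]
      by_cases hmod : PySem.Int.mod x p = 0
      · rw [if_pos hmod]
        simp only [Bool.false_eq_true, false_iff]
        push Not
        exact ⟨p, List.mem_cons_self, by omega, hmod⟩
      · rw [if_neg hmod,
          ih hsort.2 (fun q hq => hpos q (List.mem_cons_of_mem _ hq))]
        constructor
        · rintro h q hq hqq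
          rcases List.mem_cons.mp hq with rfl | hq'
          · exact hmod
          · exact h q hq' hqq
        · intro h q hq hqq
          exact h q (List.mem_cons_of_mem _ hq) hqq

-- at a candidate b ≥ 2, the break-loop over the primes below b decides primality of b
theorem bInner_natPrimes (b : Int) (hb : 2 ≤ b) :
    bInner b (natPrimes (b - 1)) = true ↔ Nat.Prime b.toNat := by
  rw [bInner_iff b _ (natPrimes_sorted _) (natPrimes_nonneg _),
    prime_iff_no_small_prime_dvd b.toNat (by omega)]
  constructor
  · intro h q hq hqq hdvd
    have h2q : 2 ≤ q := hq.two_le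
    have hqb : (q : Int) * (q : Int) ≤ b := by
      have : ((q * q : Nat) : Int) ≤ ((b.toNat : Nat) : Int) := by exact_mod_cast hqq
      push_cast at this
      omega
    have hmem : (q : Int) ∈ natPrimes (b - 1) := by
      rw [mem_natPrimes]
      refine ⟨by exact_mod_cast h2q, by nlinarith, by simpa using hq⟩
    refine h (q : Int) hmem hqb ((PySem.Int.mod_eq_zero_iff_dvd _ _).mpr ?_)
    have : ((q : Nat) : Int) ∣ ((b.toNat : Nat) : Int) := Int.natCast_dvd_natCast.mpr hdvd
    rwa [Int.toNat_of_nonneg (by omega)] at this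
  · intro h p hp hpp hmod
    obtain ⟨h1, h2, h3⟩ := (mem_natPrimes _ p).mp hp
    refine h p.toNat h3 ?_ ?_
    · have hc : ((p.toNat : Nat) : Int) * ((p.toNat : Nat) : Int) ≤ ((b.toNat : Nat) : Int) := by
        rw [Int.toNat_of_nonneg (by omega), Int.toNat_of_nonneg (by omega)]
        exact hpp
      exact_mod_cast hc
    · have hdvd : p ∣ b := (PySem.Int.mod_eq_zero_iff_dvd _ _).mp hmod
      have : ((p.toNat : Nat) : Int) ∣ ((b.toNat : Nat) : Int) := by
        rwa [Int.toNat_of_nonneg (by omega), Int.toNat_of_nonneg (by omega)]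
      exact_mod_cast this

-- running the builder over range(2, b+1) yields exactly the primes up to b
theorem build_eq (b : Int) :
    List.foldl bBuild [] (PySem.List.pyRange 2 (b + 1) 1) = natPrimes b := by
  have key : ∀ (t : Nat) (b : Int), b ≤ 1 + t →
      List.foldl bBuild [] (PySem.List.pyRange 2 (b + 1) 1) = natPrimes b := by
    intro t
    induction t with
    | zero =>
      intro b hb
      rw [PySem.List.pyRange_one_eq_nil (by omega)]
      unfold natPrimes
      rw [PySem.List.pyRange_one_eq_nil (by omega)]
      rfl
    | succ t ih =>
      intro b hb
      by_cases hsmall : b ≤ 1 + t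
      · exact ih b hsmall
      · have hb2 : 2 ≤ b := by omega
        rw [PySem.List.pyRange_one_succ_right (by omega), List.foldl_append]
        have hprev : PySem.List.pyRange 2 b 1 = PySem.List.pyRange 2 ((b - 1) + 1) 1 := by
          norm_num
        rw [hprev, ih (b - 1) (by omega)]
        have hsplit : natPrimes b
            = natPrimes (b - 1) ++ (PySem.List.pyRange b (b + 1) 1).filter
                (fun p => decide (Nat.Prime p.toNat)) := by
          unfold natPrimes
          rw [← List.filter_append]
          congr 1
          rw [show b - 1 + 1 = b by ring]
          exact PySem.List.pyRange_one_append 2 b (b + 1) (by omega) (by omega)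
        rw [hsplit, PySem.List.pyRange_one_singleton]
        simp only [List.foldl_cons, List.foldl_nil, bBuild]
        by_cases hp : Nat.Prime b.toNat
        · rw [if_pos ((bInner_natPrimes b hb2).mpr hp)]
          simp [List.filter, hp]
        · rw [if_neg (by
            intro hc
            exact hp ((bInner_natPrimes b hb2).mp hc))]
          simp [List.filter, hp]
  exact key (b + 1).toNat b (by omega)

-- B's primality test agrees with primality
theorem bPrime_eq_prime (r : Int) (hr : 2 ≤ r) :
    is_prime_B r = decide (Nat.Prime r.toNat) := by
  rw [is_prime_B, if_neg (by omega)]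
  simp only [build_eq]
  rw [Bool.eq_iff_iff, decide_eq_true_iff, List.all_eq_true,
    prime_iff_no_small_prime_dvd r.toNat (by omega)]
  constructor
  · intro h q hq hqq hdvd
    have h2q : 2 ≤ q := hq.two_le
    have hmem : (q : Int) ∈ natPrimes ((Nat.sqrt r.toNat : Nat) : Int) := by
      rw [mem_natPrimes]
      have : q ≤ Nat.sqrt r.toNat := Nat.le_sqrt.mpr hqq
      exact ⟨by exact_mod_cast h2q, by exact_mod_cast this, by simpa using hq⟩
    have := h (q : Int) hmem
    rw [bne_iff_ne] at this
    refine this ((PySem.Int.mod_eq_zero_iff_dvd _ _).mpr ?_)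
    have hc : ((q : Nat) : Int) ∣ ((r.toNat : Nat) : Int) := Int.natCast_dvd_natCast.mpr hdvd
    rwa [Int.toNat_of_nonneg (by omega)] at hc
  · intro h p hp
    obtain ⟨h1, h2, h3⟩ := (mem_natPrimes _ p).mp hp
    rw [bne_iff_ne]
    intro hmod
    have hdvd : p ∣ r := (PySem.Int.mod_eq_zero_iff_dvd _ _).mp hmod
    refine h p.toNat h3 ?_ ?_
    · have : p.toNat ≤ Nat.sqrt r.toNat := by omega
      exact Nat.le_sqrt.mp this
    · have : ((p.toNat : Nat) : Int) ∣ ((r.toNat : Nat) : Int) := by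
        rwa [Int.toNat_of_nonneg (by omega), Int.toNat_of_nonneg (by omega)]
      exact_mod_cast this

theorem prime_eq (r : Int) : is_prime_A r = is_prime_B r := by
  by_cases hr : r < 2
  · rw [is_prime_A, is_prime_B, if_pos hr, if_pos hr]
  · rw [aPrime_eq_prime r (by omega), bPrime_eq_prime r (by omega)]

-- ===== VERDICT (by name: the statement is the Claim_ definition above) =====
theorem is_reverse_prime_spec : Claim_equal_is_reverse_prime := by
  intro n _
  unfold Spec_is_reverse_prime is_reverse_prime is_reverse_prime_alt
  by_cases h : n < 2
  · rw [if_pos h, if_pos h]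
  · rw [if_neg h, if_neg h, rev_eq n (by omega), prime_eq]
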